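-- pv_equiv track=rewrite | github.com/dawidlaciak/python-simple-scripts | expression_bracket_corrector/bracket_counter.py | expression_corrector
-- ===== SOURCE A (Python) =====
-- def expression_checker(expression:str) -> bool:
--     opening_bracket = 0
--     closing_bracket = 0
--     for sign in expression:
--         if sign == '(':
--             opening_bracket += 1
--         elif sign == ')':
--             closing_bracket += 1
--         if closing_bracket > opening_bracket:
--             return False
--     if opening_bracket != closing_bracket:
--         return False
--     elif expression == '':
--         return False
--     else:
--         return True
--
-- def expression_corrector(expression:str) -> list:
--     split_expression = []
--     new_expressions = []
--     for sign in expression: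
--         split_expression.append(sign)
--     for i in range(len(split_expression)):
--         if split_expression[i] == '(' or split_expression[i] == ')':
--             temp = split_expression[i]
--             split_expression[i] = ''
--             str_expression = ''.join(split_expression)
--             is_new_expression_correct = expression_checker(str_expression)
--             if is_new_expression_correct and str_expression not in new_expressions:
--                 new_expressions.append(str_expression)
--             split_expression[i] = temp
--
--     return new_expressions
-- ===== SOURCE B (Python) =====
-- def expression_corrector(expression: str) -> list:
--     chars = list(expression)
--     n = len(chars)
--     deltas = [1 if c == '(' else (-1 if c == ')' else 0) for c in chars]
--     # prefix balances: p[j] = balance of expression[:j]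
--     p = [0]
--     cur = 0
--     for d in deltas:
--         cur += d
--         p.append(cur)
--     # prefOK[j] = all prefix balances p[0..j] are nonnegative
--     prefOK = []
--     ok = True
--     for b in p:
--         ok = ok and b >= 0
--         prefOK.append(ok)
--     # sufMin[j] = min(p[j:])
--     sufMin = []
--     cur = p[n]
--     for b in reversed(p):
--         cur = min(cur, b)
--         sufMin.append(cur)
--     sufMin.reverse()
--     results = []
--     seen = set()
--     for i in range(n):
--         d = deltas[i]
--         if d != 0:
--             if n >= 2 and p[n] == d and prefOK[i] and sufMin[i + 1] >= d:
--                 s = expression[:i] + expression[i + 1:]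
--                 if s not in seen:
--                     seen.add(s)
--                     results.append(s)
--     return results
-- ===== Notes on version B (the rewrite author's own statement) =====
-- stated objective: alternative
-- what changed: A re-validates each candidate string with a full scan (expression_checker) and dedups by scanning a list of strings; B precomputes prefix-balance, prefix-nonnegative and suffix-minimum arrays once, validates each removal position by O(1) array lookups, and dedups with a set (on bracket-dense inputs this is asymptotically better, but on the bracket-sparse timing inputs both are linear and B's extra passes make it no faster).
import Mathlib
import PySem

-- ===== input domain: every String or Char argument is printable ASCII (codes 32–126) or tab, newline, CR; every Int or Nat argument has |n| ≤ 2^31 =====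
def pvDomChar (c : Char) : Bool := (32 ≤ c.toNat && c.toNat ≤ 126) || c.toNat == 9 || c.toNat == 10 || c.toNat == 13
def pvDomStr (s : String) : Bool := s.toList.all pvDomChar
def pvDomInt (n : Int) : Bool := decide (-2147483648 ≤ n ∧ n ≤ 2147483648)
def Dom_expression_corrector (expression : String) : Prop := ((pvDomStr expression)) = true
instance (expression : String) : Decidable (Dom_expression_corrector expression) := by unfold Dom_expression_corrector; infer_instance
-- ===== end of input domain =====

-- Alternative algorithm: A re-checks each candidate string with a full scan and dedups by list membership;
-- B precomputes prefix-balance / prefix-ok / suffix-min arrays, tests each removal position by array lookups, and dedups with a set.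


-- ===== PORT A =====
-- the for-loop of expression_checker with its early `return False`, as structural recursion over the chars
def ecGo : List Char → Int → Int → Bool
  | [], opening, closing => opening == closing  -- after the loop: `if opening_bracket != closing_bracket: return False`
  | sign :: rest, opening, closing =>
    let opening' := if sign = '(' then opening + 1 else opening
    let closing' := if sign = ')' then closing + 1 else closing
    if opening' < closing' then false else ecGo rest opening' closing'

def expression_checker (expression : String) : Bool :=
  ecGo expression.toList 0 0 && !(expression == "")   -- `elif expression == '': return False else: return True`

def expression_corrector (expression : String) : List String :=
  -- `for sign in expression: split_expression.append(sign)` (a list of 1-char strings)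
  let split_expression := expression.toList.map (fun c => String.ofList [c])
  -- `for i in range(len(split_expression)): …`
  (List.range split_expression.length).foldl (fun new_expressions i =>
    if split_expression.getD i "" = "(" ∨ split_expression.getD i "" = ")" then
      -- `split_expression[i] = ''; str_expression = ''.join(split_expression)` (temp is restored afterwards)
      let str_expression := PySem.Str.join "" (split_expression.set i "")
      if expression_checker str_expression && !(new_expressions.contains str_expression) then
        new_expressions ++ [str_expression]
      else new_expressions
    else new_expressions) []

-- ===== PORT B =====
def bDelta (c : Char) : Int := if c = '(' then 1 else if c = ')' then -1 else 0

-- `p = [0]; cur = 0; for d in deltas: cur += d; p.append(cur)`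
def bBuildP : List Int → List Int → Int → List Int
  | [], p, _ => p
  | d :: ds, p, cur => bBuildP ds (p ++ [cur + d]) (cur + d)

-- `prefOK = []; ok = True; for b in p: ok = ok and b >= 0; prefOK.append(ok)`
def bBuildOK : List Int → List Bool → Bool → List Bool
  | [], acc, _ => acc
  | b :: bs, acc, ok => bBuildOK bs (acc ++ [ok && decide (0 ≤ b)]) (ok && decide (0 ≤ b))

-- `sufMin = []; cur = p[n]; for b in reversed(p): cur = min(cur, b); sufMin.append(cur)`
def bBuildMin : List Int → List Int → Int → List Int
  | [], acc, _ => acc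
  | b :: bs, acc, cur => bBuildMin bs (acc ++ [min cur b]) (min cur b)

def expression_corrector_alt (expression : String) : List String :=
  let chars := expression.toList
  let n := chars.length
  let deltas := chars.map bDelta
  let p := bBuildP deltas [0] 0
  let prefOK := bBuildOK p [] true
  let sufMin := (bBuildMin p.reverse [] (p.getD n 0)).reverse   -- `sufMin.reverse()`
  -- `for i in range(n): …` with accumulators (results, seen)
  ((List.range n).foldl (fun (st : List String × PySem.Set String) i =>
    let d := deltas.getD i 0
    if d ≠ 0 then
      if 2 ≤ n ∧ p.getD n 0 = d ∧ prefOK.getD i false = true ∧ d ≤ sufMin.getD (i+1) 0 then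
        -- `s = expression[:i] + expression[i+1:]`
        let s := String.ofList (PySem.List.slice chars none (some (i : Int)) ++
                                PySem.List.slice chars (some ((i : Int) + 1)) none)
        if !(PySem.Set.contains st.2 s) then (st.1 ++ [s], PySem.Set.add st.2 s) else st
      else st
    else st) ([], PySem.Set.empty)).1

-- ===== PRECONDITION & SPEC =====
def Spec_expression_corrector (expression : String) (out : List String) : Prop := out = expression_corrector_alt expression
instance (expression : String) (out : List String) : Decidable (Spec_expression_corrector expression out) := by unfold Spec_expression_corrector; infer_instance

-- ===== CLAIM (what is proved, stated in full; the proofs are below) =====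
def Claim_equal_expression_corrector : Prop := ∀ (expression : String), Dom_expression_corrector expression → Spec_expression_corrector expression (expression_corrector expression)

-- ===== LEMMAS AND PROOFS =====

-- prefix-balance: pvP cs j = balance of the first j characters
def pvP (cs : List Char) (j : Nat) : Int := ((cs.map bDelta).take j).sum

def pvBal (cs : List Char) : Int := (cs.map bDelta).sum

lemma pvBal_cons (c : Char) (cs : List Char) : pvBal (c :: cs) = bDelta c + pvBal cs := by
  simp [pvBal]

lemma bBuildP_spec (ds : List Int) : ∀ (acc : List Int) (cur : Int),
    bBuildP ds acc cur = acc ++ (List.range ds.length).map (fun j => cur + (ds.take (j+1)).sum) := by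
  induction ds with
  | nil => intro acc cur; simp [bBuildP]
  | cons d ds ih =>
    intro acc cur
    rw [bBuildP, ih]
    simp [List.range_succ_eq_map, List.map_map, Function.comp_def, List.append_assoc]
    intro a ha; ring

lemma bBuildOK_spec (bs : List Int) : ∀ (acc : List Bool) (ok : Bool),
    bBuildOK bs acc ok = acc ++ (List.range bs.length).map
      (fun j => ok && (bs.take (j+1)).all (fun b => decide (0 ≤ b))) := by
  induction bs with
  | nil => intro acc ok; simp [bBuildOK]
  | cons b bs ih =>
    intro acc ok
    rw [bBuildOK, ih]
    simp [List.range_succ_eq_map, List.map_map, Function.comp_def, List.append_assoc, Bool.and_assoc]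

lemma bBuildMin_spec (bs : List Int) : ∀ (acc : List Int) (cur : Int),
    bBuildMin bs acc cur = acc ++ (List.range bs.length).map (fun j => (bs.take (j+1)).foldl min cur) := by
  induction bs with
  | nil => intro acc cur; simp [bBuildMin]
  | cons b bs ih =>
    intro acc cur
    rw [bBuildMin, ih]
    simp [List.range_succ_eq_map, List.map_map, Function.comp_def, List.append_assoc]

lemma le_foldl_min_iff (d : Int) (l : List Int) : ∀ (c : Int),
    d ≤ l.foldl min c ↔ d ≤ c ∧ ∀ x ∈ l, d ≤ x := by
  induction l with
  | nil => simp
  | cons b bs ih =>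
    intro c
    simp only [List.foldl_cons, ih, le_min_iff, List.mem_cons]
    constructor
    · rintro ⟨⟨h1, h2⟩, h3⟩; exact ⟨h1, fun x hx => hx.elim (fun e => e ▸ h2) (h3 x)⟩
    · rintro ⟨h1, h2⟩; exact ⟨⟨h1, h2 b (Or.inl rfl)⟩, fun x hx => h2 x (Or.inr hx)⟩

lemma ecGo_spec (l : List Char) : ∀ (o c : Int), c ≤ o →
    (ecGo l o c = true ↔ ((∀ k ≤ l.length, 0 ≤ (o - c) + pvBal (l.take k)) ∧ (o - c) + pvBal l = 0)) := by
  induction l with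
  | nil =>
    intro o c hco
    simp only [ecGo, beq_iff_eq, List.length_nil, List.take_nil]
    constructor
    · intro h; subst h; simp [pvBal]
    · rintro ⟨-, h⟩; simp [pvBal] at h; omega
  | cons sign rest ih =>
    intro o c hco
    have hd : (if sign = '(' then o + 1 else o) - (if sign = ')' then c + 1 else c)
        = (o - c) + bDelta sign := by
      by_cases h1 : sign = '(' <;> by_cases h2 : sign = ')' <;> simp_all [bDelta] <;> omega
    simp only [ecGo]
    by_cases hlt : (if sign = '(' then o + 1 else o) < (if sign = ')' then c + 1 else c)
    · simp only [hlt, if_true]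
      constructor
      · intro h; exact absurd h (by simp)
      · rintro ⟨h, -⟩
        have h1 := h 1 (by simp)
        simp [pvBal] at h1
        omega
    · simp only [hlt, if_false]
      rw [ih _ _ (by omega)]
      constructor
      · rintro ⟨h1, h2⟩
        refine ⟨?_, by rw [pvBal_cons]; omega⟩
        intro k hk
        match k with
        | 0 => simpa [pvBal] using hco
        | k+1 =>
          have := h1 k (by simpa using hk)
          rw [List.take_succ_cons, pvBal_cons]
          omega
      · rintro ⟨h1, h2⟩
        refine ⟨?_, by rw [pvBal_cons] at h2; omega⟩
        intro k hk
        have := h1 (k+1) (by simpa using hk)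
        rw [List.take_succ_cons, pvBal_cons] at this
        omega

lemma take_remove_sum (q : List Int) (i k : Nat) (hi : i < q.length) :
    (((q.take i ++ q.drop (i+1)).take k)).sum =
      if k ≤ i then (q.take k).sum else (q.take (k+1)).sum - q[i] := by
  have hlen : (q.take i).length = i := by simp; omega
  by_cases h : k ≤ i
  · rw [if_pos h, List.take_append, List.take_take, min_eq_left h, hlen,
      Nat.sub_eq_zero_of_le (by omega), List.take_zero, List.append_nil]
  · rw [if_neg h]
    have hq : q = q.take i ++ q[i] :: q.drop (i+1) := by
      conv_lhs => rw [← List.take_append_drop i q, ← List.getElem_cons_drop hi]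
    have h2 : (q.take (k+1)).sum = (q.take i).sum + q[i] + ((q.drop (i+1)).take (k-i)).sum := by
      conv_lhs => rw [hq]
      rw [List.take_append, List.take_take, min_eq_right (by omega), hlen]
      have : k + 1 - i = (k - i) + 1 := by omega
      rw [this, List.take_succ_cons]
      simp; ring
    rw [List.take_append, List.take_take, min_eq_right (by omega), hlen, h2]
    simp; ring

lemma sum_remove (q : List Int) (i : Nat) (hi : i < q.length) :
    (q.take i ++ q.drop (i+1)).sum = q.sum - q[i] := by
  have hq : q = q.take i ++ q[i] :: q.drop (i+1) := by
    conv_lhs => rw [← List.take_append_drop i q, ← List.getElem_cons_drop hi]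
  have h1 : (q.take i).sum + (q.drop i).sum = q.sum := List.sum_take_add_sum_drop _ _
  have h2 : (q.drop i).sum = q[i] + (q.drop (i+1)).sum := by
    conv_lhs => rw [← List.getElem_cons_drop hi]
    rw [List.sum_cons]
  simp only [List.sum_append]
  omega

lemma flatten_singletons (cs : List Char) : (List.map (fun c => [c]) cs).flatten = cs := by
  induction cs <;> simp_all

lemma join_empty_flatten (parts : List (List Char)) : PySem.Chars.join [] parts = parts.flatten := by
  induction parts with
  | nil => simp [PySem.Chars.join_nil]
  | cons p rest ih =>
    cases rest with
    | nil => simp [PySem.Chars.join_singleton]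
    | cons q r => rw [PySem.Chars.join_cons_cons]; simp_all

lemma set_blank_flatten (cs : List Char) : ∀ (i : Nat),
    (((cs.map (fun c => [c])).set i []).flatten) = cs.take i ++ cs.drop (i+1) := by
  induction cs with
  | nil => intro i; simp
  | cons c cs ih =>
    intro i
    cases i with
    | zero => simp [flatten_singletons]
    | succ i => simp [ih i]

lemma join_set_blank (cs : List Char) (i : Nat) :
    (PySem.Str.join "" ((cs.map (fun c => String.ofList [c])).set i "")).toList
      = cs.take i ++ cs.drop (i+1) := by
  rw [PySem.Str.toList_join]
  have h : (List.map String.toList ((cs.map (fun c => String.ofList [c])).set i ""))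
      = (cs.map (fun c => [c])).set i [] := by
    rw [List.map_set]
    simp [List.map_map, Function.comp_def]
  rw [h]
  have h0 : ("" : String).toList = [] := rfl
  rw [h0, join_empty_flatten, set_blank_flatten]

-- A's per-position check, characterised by prefix balances
lemma flag_iff (cs : List Char) (i : Nat) (hi : i < cs.length) :
    (expression_checker (PySem.Str.join "" ((cs.map (fun c => String.ofList [c])).set i "")) = true)
      ↔ (2 ≤ cs.length ∧ pvP cs cs.length = bDelta cs[i]
          ∧ (∀ k ≤ i, 0 ≤ pvP cs k)
          ∧ (∀ k, i+1 ≤ k → k ≤ cs.length → bDelta cs[i] ≤ pvP cs k)) := by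
  have hq : i < (cs.map bDelta).length := by simpa using hi
  have hqi : (cs.map bDelta)[i] = bDelta cs[i] := List.getElem_map _
  have htl := join_set_blank cs i
  have hlen : (cs.take i ++ cs.drop (i+1)).length = cs.length - 1 := by
    simp; omega
  simp only [expression_checker, Bool.and_eq_true, htl]
  have hne : (¬(PySem.Str.join "" ((cs.map (fun c => String.ofList [c])).set i "") = ""))
      ↔ 2 ≤ cs.length := by
    rw [← String.toList_inj, htl]
    have h0 : ("" : String).toList = [] := rfl
    rw [h0, ← List.length_eq_zero_iff.not, hlen]
    omega
  have hmap : ∀ k : Nat, pvBal ((cs.take i ++ cs.drop (i+1)).take k)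
      = (((cs.map bDelta).take i ++ (cs.map bDelta).drop (i+1)).take k).sum := by
    intro k
    simp [pvBal, List.map_take, List.map_append, List.map_drop]
  have hfull : pvBal (cs.take i ++ cs.drop (i+1)) = pvP cs cs.length - (cs.map bDelta)[i] := by
    have := sum_remove (cs.map bDelta) i hq
    simp only [pvBal, List.map_append, List.map_take, List.map_drop]
    rw [this, pvP, List.take_of_length_le (by simp)]
  have hstep : pvP cs (i+1) = pvP cs i + (cs.map bDelta)[i] := by
    rw [pvP, pvP, List.sum_take_succ _ _ hq]
  rw [ecGo_spec _ 0 0 le_rfl]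
  simp only [sub_zero, zero_add, hlen, hfull]
  constructor
  · rintro ⟨⟨h1, h2⟩, h3⟩
    rw [Bool.not_eq_true', beq_eq_false_iff_ne] at h3
    have hn2 : 2 ≤ cs.length := hne.mp h3
    refine ⟨hn2, by rw [← hqi]; omega, ?_, ?_⟩
    · intro k hk
      have := h1 k (by omega)
      rw [hmap, take_remove_sum _ _ _ hq, if_pos hk] at this
      exact this
    · intro k hk1 hk2
      rcases Nat.eq_or_lt_of_le hk1 with he | hlt
      · have h5 := h1 i (by omega)
        rw [hmap, take_remove_sum _ _ _ hq, if_pos le_rfl] at h5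
        have h0 : (0:Int) ≤ pvP cs i := h5
        rw [← he, hstep, hqi]
        omega
      · have h5 := h1 (k-1) (by omega)
        rw [hmap, take_remove_sum _ _ _ hq, if_neg (by omega)] at h5
        have hk1' : k - 1 + 1 = k := by omega
        rw [hk1'] at h5
        have h0 : (0:Int) ≤ pvP cs k - (cs.map bDelta)[i] := h5
        rw [← hqi]
        omega
  · rintro ⟨hn2, hbal, hpre, hsuf⟩
    rw [← hqi] at hbal
    refine ⟨⟨?_, by omega⟩, ?_⟩
    · intro k hk
      rw [hmap, take_remove_sum _ _ _ hq]
      by_cases hki : k ≤ i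
      · rw [if_pos hki]; exact hpre k hki
      · rw [if_neg hki]
        have h0 : bDelta cs[i] ≤ pvP cs (k+1) := hsuf (k+1) (by omega) (by omega)
        show (0:Int) ≤ pvP cs (k+1) - (cs.map bDelta)[i]
        rw [hqi]
        omega
    · rw [Bool.not_eq_true', beq_eq_false_iff_ne]
      exact hne.mpr hn2

-- the two loops, run in lock-step
lemma fold_pair (stepA : List String → Nat → List String)
    (stepB : (List String × PySem.Set String) → Nat → (List String × PySem.Set String))
    (is : List Nat)
    (h : ∀ i ∈ is, ∀ res : List String, stepB (res, res) i = (stepA res i, stepA res i)) :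
    ∀ res, is.foldl stepB (res, res) = (is.foldl stepA res, is.foldl stepA res) := by
  induction is with
  | nil => intro res; simp
  | cons i is ih =>
    intro res
    simp only [List.foldl_cons, h i (by simp)]
    exact ih (fun j hj res => h j (by simp [hj]) res) _

lemma ofList_singleton_inj (c c' : Char) : (String.ofList [c] = String.ofList [c']) ↔ c = c' := by
  rw [← String.toList_inj]; simp

-- characterisation of the three precomputed arrays of B
lemma pL_getD (cs : List Char) (j : Nat) (hj : j ≤ cs.length) :
    (bBuildP (cs.map bDelta) [0] 0).getD j 0 = pvP cs j := by
  rw [bBuildP_spec]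
  cases j with
  | zero => simp [pvP]
  | succ k =>
    have : ([(0:Int)] ++ (List.range (cs.map bDelta).length).map (fun j => 0 + ((cs.map bDelta).take (j+1)).sum))
        = (0:Int) :: (List.range (cs.map bDelta).length).map (fun j => 0 + ((cs.map bDelta).take (j+1)).sum) := rfl
    rw [this, List.getD_cons_succ, PySem.List.getD_map_range _ _ _ _ (by simpa using hj)]
    simp [pvP]

lemma pL_length (cs : List Char) : (bBuildP (cs.map bDelta) [0] 0).length = cs.length + 1 := by
  rw [bBuildP_spec]; simp

lemma okL_getD (cs : List Char) (i : Nat) (hi : i < cs.length) :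
    ((bBuildOK (bBuildP (cs.map bDelta) [0] 0) [] true).getD i false = true
      ↔ ∀ k ≤ i, 0 ≤ pvP cs k) := by
  have hlen := pL_length cs
  rw [bBuildOK_spec]
  rw [List.nil_append, PySem.List.getD_map_range _ _ _ _ (by omega)]
  simp only [Bool.true_and, List.all_eq_true, decide_eq_true_eq]
  constructor
  · intro h k hk
    rw [← pL_getD cs k (by omega)]
    rw [List.getD_eq_getElem _ _ (by omega)]
    exact h _ (List.mem_take_iff_getElem.mpr ⟨k, by omega, rfl⟩)
  · intro h x hx
    rcases List.mem_take_iff_getElem.mp hx with ⟨k, hk, rfl⟩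
    rw [← List.getD_eq_getElem _ (0:Int) (by omega), pL_getD cs k (by omega)]
    exact h k (by omega)

lemma getD_reverse (l : List Int) (k : Nat) (hk : k < l.length) :
    l.reverse.getD k 0 = l.getD (l.length - 1 - k) 0 := by
  rw [List.getD_eq_getElem _ _ (by simpa using hk), List.getElem_reverse,
    List.getD_eq_getElem _ _ (by omega)]

lemma minL_getD (cs : List Char) (i : Nat) (hi : i < cs.length) (dd : Int) :
    (dd ≤ (bBuildMin (bBuildP (cs.map bDelta) [0] 0).reverse []
              ((bBuildP (cs.map bDelta) [0] 0).getD cs.length 0)).reverse.getD (i+1) 0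
      ↔ ∀ k, i+1 ≤ k → k ≤ cs.length → dd ≤ pvP cs k) := by
  have hlen := pL_length cs
  set pL := bBuildP (cs.map bDelta) [0] 0 with hpL
  have hg : ∀ j, j ≤ cs.length → pL.getD j 0 = pvP cs j := fun j hj => pL_getD cs j hj
  have hc0 : pL.getD cs.length 0 = pvP cs cs.length := hg cs.length le_rfl
  rw [bBuildMin_spec, List.nil_append]
  have hlenM : ((List.range pL.reverse.length).map
      (fun j => (pL.reverse.take (j+1)).foldl min (pL.getD cs.length 0))).length = cs.length + 1 := by
    simp [hlen]
  rw [getD_reverse _ _ (by omega)]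
  rw [hlenM]
  have hidx : cs.length + 1 - 1 - (i + 1) = cs.length - i - 1 := by omega
  rw [hidx, PySem.List.getD_map_range _ _ _ _ (by simp [hlen]; omega)]
  have hidx2 : cs.length - i - 1 + 1 = cs.length - i := by omega
  rw [hidx2, le_foldl_min_iff]
  rw [List.take_reverse]
  have hidx3 : pL.length - (cs.length - i) = i + 1 := by omega
  rw [hidx3, hc0]
  constructor
  · rintro ⟨h0, h1⟩ k hk1 hk2
    rcases Nat.eq_or_lt_of_le hk2 with he | hlt
    · rw [he]; exact h0
    · rw [← hg k (by omega), List.getD_eq_getElem _ _ (by omega)]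
      refine h1 _ ?_
      rw [List.mem_reverse, List.mem_drop_iff_getElem]
      exact ⟨k - (i+1), by omega, by congr 1; omega⟩
  · intro h
    refine ⟨h cs.length (by omega) le_rfl, ?_⟩
    intro x hx
    rw [List.mem_reverse, List.mem_drop_iff_getElem] at hx
    rcases hx with ⟨j, hj, rfl⟩
    rw [← List.getD_eq_getElem _ (0:Int) (by omega), hg (i+1+j) (by omega)]
    exact h (i+1+j) (by omega) (by omega)

-- the string B builds from slices equals the string A builds by blanking slot i and joining
lemma strB_eq_strA (cs : List Char) (i : Nat) :
    String.ofList (PySem.List.slice cs none (some (i:Int)) ++ PySem.List.slice cs (some ((i:Int)+1)) none)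
      = PySem.Str.join "" ((cs.map (fun c => String.ofList [c])).set i "") := by
  rw [← String.toList_inj, join_set_blank, String.toList_ofList]
  have h1 : ((i:Int)+1) = (((i+1 : Nat)):Int) := by push_cast; ring
  rw [PySem.List.slice_to_natCast, h1, PySem.List.slice_from_natCast]

-- one loop iteration of A and of B do the same thing (B run on a duplicated accumulator)
lemma step_eq (cs : List Char) (i : Nat) (hi : i < cs.length) (res : List String) :
    (if (cs.map bDelta).getD i 0 ≠ 0 then
      if 2 ≤ cs.length ∧ (bBuildP (cs.map bDelta) [0] 0).getD cs.length 0 = (cs.map bDelta).getD i 0 ∧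
         (bBuildOK (bBuildP (cs.map bDelta) [0] 0) [] true).getD i false = true ∧
         (cs.map bDelta).getD i 0 ≤ ((bBuildMin (bBuildP (cs.map bDelta) [0] 0).reverse []
            ((bBuildP (cs.map bDelta) [0] 0).getD cs.length 0)).reverse).getD (i+1) 0 then
        if !(PySem.Set.contains ((res, (res : PySem.Set String)) : List String × PySem.Set String).2
              (String.ofList (PySem.List.slice cs none (some (i:Int)) ++ PySem.List.slice cs (some ((i:Int)+1)) none))) then
          (((res, (res : PySem.Set String)).1 ++ [String.ofList (PySem.List.slice cs none (some (i:Int)) ++ PySem.List.slice cs (some ((i:Int)+1)) none)],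
            PySem.Set.add ((res, (res : PySem.Set String)) : List String × PySem.Set String).2
              (String.ofList (PySem.List.slice cs none (some (i:Int)) ++ PySem.List.slice cs (some ((i:Int)+1)) none))) : List String × PySem.Set String)
        else (res, res)
      else (res, res)
    else (res, res))
    = ((if (cs.map (fun c => String.ofList [c])).getD i "" = "(" ∨ (cs.map (fun c => String.ofList [c])).getD i "" = ")" then
          if expression_checker (PySem.Str.join "" ((cs.map (fun c => String.ofList [c])).set i "")) &&
             !(res.contains (PySem.Str.join "" ((cs.map (fun c => String.ofList [c])).set i ""))) then
            res ++ [PySem.Str.join "" ((cs.map (fun c => String.ofList [c])).set i "")]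
          else res
        else res),
       (if (cs.map (fun c => String.ofList [c])).getD i "" = "(" ∨ (cs.map (fun c => String.ofList [c])).getD i "" = ")" then
          if expression_checker (PySem.Str.join "" ((cs.map (fun c => String.ofList [c])).set i "")) &&
             !(res.contains (PySem.Str.join "" ((cs.map (fun c => String.ofList [c])).set i ""))) then
            res ++ [PySem.Str.join "" ((cs.map (fun c => String.ofList [c])).set i "")]
          else res
        else res)) := by
  have hgetS : (cs.map (fun c => String.ofList [c])).getD i "" = String.ofList [cs[i]] := by
    rw [List.getD_eq_getElem _ _ (by simpa using hi), List.getElem_map]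
  have hdel : (cs.map bDelta).getD i 0 = bDelta cs[i] := by
    rw [List.getD_eq_getElem _ _ (by simpa using hi), List.getElem_map]
  have hopen : ("(" : String) = String.ofList ['('] := rfl
  have hclose : (")" : String) = String.ofList [')'] := rfl
  rw [hgetS, hdel, strB_eq_strA]
  set sA := PySem.Str.join "" ((cs.map (fun c => String.ofList [c])).set i "") with hsA
  by_cases hbr : bDelta cs[i] = 0
  · -- not a bracket: both sides leave the accumulator unchanged
    have hA0 : ¬(String.ofList [cs[i]] = "(" ∨ String.ofList [cs[i]] = ")") := by
      rintro (h | h)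
      · rw [hopen, ofList_singleton_inj] at h
        simp [bDelta, h] at hbr
      · rw [hclose, ofList_singleton_inj] at h
        simp [bDelta, h] at hbr
    rw [if_neg (by simpa using hbr), if_neg hA0]
  · -- a bracket
    have hA1 : String.ofList [cs[i]] = "(" ∨ String.ofList [cs[i]] = ")" := by
      by_cases h1 : cs[i] = '('
      · exact Or.inl (by rw [hopen, ofList_singleton_inj]; exact h1)
      · by_cases h2 : cs[i] = ')'
        · exact Or.inr (by rw [hclose, ofList_singleton_inj]; exact h2)
        · simp [bDelta, h1, h2] at hbr
    rw [if_pos hbr, if_pos hA1]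
    have hflag : expression_checker sA = true ↔
        (2 ≤ cs.length ∧ (bBuildP (cs.map bDelta) [0] 0).getD cs.length 0 = bDelta cs[i] ∧
         (bBuildOK (bBuildP (cs.map bDelta) [0] 0) [] true).getD i false = true ∧
         bDelta cs[i] ≤ ((bBuildMin (bBuildP (cs.map bDelta) [0] 0).reverse []
            ((bBuildP (cs.map bDelta) [0] 0).getD cs.length 0)).reverse).getD (i+1) 0) := by
      rw [hsA, flag_iff cs i hi, minL_getD cs i hi (bDelta cs[i]), okL_getD cs i hi,
        pL_getD cs cs.length le_rfl]
    by_cases hc : (2 ≤ cs.length ∧ (bBuildP (cs.map bDelta) [0] 0).getD cs.length 0 = bDelta cs[i] ∧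
         (bBuildOK (bBuildP (cs.map bDelta) [0] 0) [] true).getD i false = true ∧
         bDelta cs[i] ≤ ((bBuildMin (bBuildP (cs.map bDelta) [0] 0).reverse []
            ((bBuildP (cs.map bDelta) [0] 0).getD cs.length 0)).reverse).getD (i+1) 0)
    · rw [if_pos hc, hflag.mpr hc]
      simp only [Bool.true_and]
      cases hm : res.contains sA with
      | true =>
        simp
        exact List.mem_of_elem_eq_true hm
      | false =>
        have hnm : ¬ sA ∈ res := by simpa using hm
        simp [PySem.Set.add, PySem.Set.contains_eq_listContains, hnm]
    · rw [if_neg hc]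
      have : expression_checker sA = false := by
        cases h : expression_checker sA
        · rfl
        · exact absurd (hflag.mp h) hc
      rw [this]
      simp

-- ===== VERDICT (by name: the statement is the Claim_ definition above) =====
theorem expression_corrector_spec : Claim_equal_expression_corrector := by
  intro e _
  show expression_corrector e = expression_corrector_alt e
  have hA : expression_corrector e =
      (List.range (e.toList.map (fun c => String.ofList [c])).length).foldl
        (fun new_expressions i =>
          if (e.toList.map (fun c => String.ofList [c])).getD i "" = "(" ∨
             (e.toList.map (fun c => String.ofList [c])).getD i "" = ")" then
            if expression_checker (PySem.Str.join "" ((e.toList.map (fun c => String.ofList [c])).set i "")) &&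
               !(new_expressions.contains (PySem.Str.join "" ((e.toList.map (fun c => String.ofList [c])).set i ""))) then
              new_expressions ++ [PySem.Str.join "" ((e.toList.map (fun c => String.ofList [c])).set i "")]
            else new_expressions
          else new_expressions) [] := rfl
  have hB : expression_corrector_alt e =
      ((List.range e.toList.length).foldl
        (fun (st : List String × PySem.Set String) i =>
          if (e.toList.map bDelta).getD i 0 ≠ 0 then
            if 2 ≤ e.toList.length ∧ (bBuildP (e.toList.map bDelta) [0] 0).getD e.toList.length 0 = (e.toList.map bDelta).getD i 0 ∧
               (bBuildOK (bBuildP (e.toList.map bDelta) [0] 0) [] true).getD i false = true ∧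
               (e.toList.map bDelta).getD i 0 ≤ ((bBuildMin (bBuildP (e.toList.map bDelta) [0] 0).reverse []
                  ((bBuildP (e.toList.map bDelta) [0] 0).getD e.toList.length 0)).reverse).getD (i+1) 0 then
              if !(PySem.Set.contains st.2
                    (String.ofList (PySem.List.slice e.toList none (some (i:Int)) ++ PySem.List.slice e.toList (some ((i:Int)+1)) none))) then
                (st.1 ++ [String.ofList (PySem.List.slice e.toList none (some (i:Int)) ++ PySem.List.slice e.toList (some ((i:Int)+1)) none)],
                 PySem.Set.add st.2
                   (String.ofList (PySem.List.slice e.toList none (some (i:Int)) ++ PySem.List.slice e.toList (some ((i:Int)+1)) none)))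
              else st
            else st
          else st) (([] : List String), ([] : PySem.Set String))).1 := rfl
  rw [hA, hB, List.length_map]
  rw [fold_pair _ _ _ (fun i hi res => by
    have hilt : i < e.toList.length := List.mem_range.mp hi
    exact step_eq e.toList i hilt res) []]
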